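-- pv_equiv track=rewrite | github.com/RvanB/marc-lsp | server.py | detect_format
-- ===== SOURCE A (Python) =====
-- def detect_format(content: str) -> str:
--     """Detect whether content is MRK format or line mode.
--
--     Returns 'mrk' or 'line'.
--     """
--     for line in content.split('\n'):
--         stripped = line.strip()
--         if not stripped:
--             continue
--         if stripped.startswith('='):
--             return 'mrk'
--         # Non-empty, non-= line found; assume line mode
--         return 'line'
--     return 'mrk'  # default
-- ===== SOURCE B (Python) =====
-- def detect_format(content: str) -> str:
--     """Detect whether content is MRK format or line mode.
--
--     Returns 'mrk' or 'line'.
--     """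
--     # One strip of the whole string instead of a per-line loop: the first
--     # non-whitespace character of the content is exactly the first character
--     # of the first non-empty stripped line.
--     s = content.strip()
--     if not s:
--         return 'mrk'
--     return 'mrk' if s[0] == '=' else 'line'
-- ===== Notes on version B (the rewrite author's own statement) =====
-- stated objective: simpler
-- what changed: B replaces the per-line split/strip/classify loop with a single strip of the whole content and one look at its first character (the first non-whitespace char of the string is the first char of the first non-empty stripped line).
import Mathlib
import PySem

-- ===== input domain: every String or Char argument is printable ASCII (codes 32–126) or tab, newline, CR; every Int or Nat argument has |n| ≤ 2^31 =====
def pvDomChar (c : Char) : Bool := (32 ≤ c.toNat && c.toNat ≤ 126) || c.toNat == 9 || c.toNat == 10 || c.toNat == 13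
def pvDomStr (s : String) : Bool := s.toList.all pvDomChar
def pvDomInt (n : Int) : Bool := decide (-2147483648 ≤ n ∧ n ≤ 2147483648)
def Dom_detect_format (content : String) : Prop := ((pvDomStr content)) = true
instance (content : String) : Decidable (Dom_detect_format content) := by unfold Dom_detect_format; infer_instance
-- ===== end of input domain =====

-- B strips the whole content once and inspects its first character instead of looping over split lines (objective: simpler).

-- ===== PORT A =====
-- the for-loop over content.split('\n'): strip each line, skip empty ones, classify the first non-empty one
def pvLoopA : List (List Char) → String
  | [] => "mrk"  -- default after the loop
  | line :: rest =>
    let stripped := PySem.Chars.strip line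
    if stripped = [] then pvLoopA rest
    else if PySem.Chars.startswith stripped ['='] then "mrk" else "line"

def detect_format (content : String) : String :=
  pvLoopA (PySem.Chars.splitOn content.toList ['\n'])

-- ===== PORT B =====
def detect_format_alt (content : String) : String :=
  let s := PySem.Chars.strip content.toList
  if s = [] then "mrk"
  else if PySem.List.pyGet? s 0 = some '=' then "mrk" else "line"

-- ===== PRECONDITION & SPEC =====
def Spec_detect_format (content : String) (out : String) : Prop := out = detect_format_alt content
instance (content : String) (out : String) : Decidable (Spec_detect_format content out) := by unfold Spec_detect_format; infer_instance

-- ===== CLAIM (what is proved, stated in full; the proofs are below) =====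
def Claim_equal_detect_format : Prop := ∀ (content : String), Dom_detect_format content → Spec_detect_format content (detect_format content)

-- ===== LEMMAS AND PROOFS =====

-- forward-recursive reformulation of PySem.Chars.splitOn.go (acc made explicit)
def pvSplitAux : Nat → List Char → List Char → List (List Char)
  | 0, l, cur => [cur.reverse ++ l]
  | _+1, [], cur => [cur.reverse]
  | f+1, c :: rest, cur =>
    if c = '\n' then cur.reverse :: pvSplitAux f rest []
    else pvSplitAux f rest (c :: cur)

-- the common value of both programs, read off the left-stripped content
def pvClassify (cs : List Char) : String :=
  match (PySem.Chars.lstrip cs).head? with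
  | none => "mrk"
  | some h => if h = '=' then "mrk" else "line"

theorem pv_go_eq (fuel : Nat) : ∀ (l cur : List Char) (acc : List (List Char)),
    PySem.Chars.splitOn.go ['\n'] fuel l cur acc = acc.reverse ++ pvSplitAux fuel l cur := by
  induction fuel with
  | zero =>
    intro l cur acc
    rw [PySem.Chars.splitOn.go.eq_def]
    simp [pvSplitAux]
  | succ f ih =>
    intro l cur acc
    rw [PySem.Chars.splitOn.go.eq_def]
    cases l with
    | nil => simp [pvSplitAux]
    | cons c rest =>
      by_cases hc : c = '\n'
      · subst hc
        simp [List.isPrefixOf, pvSplitAux, ih]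
      · have : (['\n'].isPrefixOf (c :: rest)) = false := by
          simp [List.isPrefixOf]; exact fun h => absurd h.symm hc
        simp [this, pvSplitAux, hc, ih]

theorem pv_head_lstrip_not_space {cs : List Char} {h : Char} {t : List Char}
    (he : PySem.Chars.lstrip cs = h :: t) : PySem.Chars.isspace h = false := by
  unfold PySem.Chars.lstrip at he
  have hne : cs.dropWhile PySem.Chars.isspace ≠ [] := by simp [he]
  have := List.head_dropWhile_not (p := PySem.Chars.isspace) (l := cs) hne
  rwa [show (cs.dropWhile PySem.Chars.isspace).head hne = h by simp [he]] at this

theorem pv_rstrip_cons {h : Char} (t : List Char) (hh : PySem.Chars.isspace h = false) :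
    PySem.Chars.rstrip (h :: t) = h :: PySem.Chars.rstrip t := by
  unfold PySem.Chars.rstrip
  have : List.dropWhile PySem.Chars.isspace (t.reverse ++ [h])
      = List.dropWhile PySem.Chars.isspace t.reverse ++ [h] := by
    rw [List.dropWhile_append]
    split
    · next he => simp [List.dropWhile, hh, List.isEmpty_iff.mp he]
    · rfl
  simp [this]

-- strip and lstrip agree on emptiness and the first character
theorem pv_strip_of_lstrip_nil {cs : List Char} (he : PySem.Chars.lstrip cs = []) :
    PySem.Chars.strip cs = [] := by
  unfold PySem.Chars.strip
  rw [he]; rfl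

theorem pv_strip_of_lstrip_cons {cs : List Char} {h : Char} {t : List Char}
    (he : PySem.Chars.lstrip cs = h :: t) :
    PySem.Chars.strip cs = h :: PySem.Chars.rstrip t := by
  unfold PySem.Chars.strip
  rw [he, pv_rstrip_cons t (pv_head_lstrip_not_space he)]

theorem pv_single (x : List Char) : pvLoopA [x] = pvClassify x := by
  cases he : PySem.Chars.lstrip x with
  | nil =>
    simp [pvLoopA, pvClassify, he, pv_strip_of_lstrip_nil he]
  | cons h t =>
    have hs := pv_strip_of_lstrip_cons he
    have hsw : PySem.Chars.startswith (h :: PySem.Chars.rstrip t) ['='] = (h == '=') := by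
      simp [PySem.Chars.startswith, List.isPrefixOf, BEq.comm]
    by_cases hq : h = '='
    · simp [pvLoopA, pvClassify, he, hs, PySem.Chars.startswith, List.isPrefixOf, hq]
    · simp [pvLoopA, pvClassify, he, hs, hsw, hq]

theorem pv_lstrip_append (xs ys : List Char) :
    PySem.Chars.lstrip (xs ++ ys) =
      if PySem.Chars.lstrip xs = [] then PySem.Chars.lstrip ys
      else PySem.Chars.lstrip xs ++ ys := by
  unfold PySem.Chars.lstrip
  rw [List.dropWhile_append]
  split
  · next he => simp_all
  · next he => simp_all

theorem pv_classify_skip {xs : List Char} (he : PySem.Chars.lstrip xs = []) (c : Char)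
    (hc : PySem.Chars.isspace c = true) (rest : List Char) :
    pvClassify (xs ++ c :: rest) = pvClassify rest := by
  unfold pvClassify
  rw [pv_lstrip_append, he]
  simp [PySem.Chars.lstrip, List.dropWhile, hc]

theorem pv_main (fuel : Nat) : ∀ (l cur : List Char),
    pvLoopA (pvSplitAux fuel l cur) = pvClassify (cur.reverse ++ l) := by
  induction fuel with
  | zero => intro l cur; exact pv_single _
  | succ f ih =>
    intro l cur
    cases l with
    | nil => simpa using pv_single cur.reverse
    | cons c rest =>
      by_cases hc : c = '\n'
      · subst hc
        show pvLoopA (cur.reverse :: pvSplitAux f rest []) = _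
        cases he : PySem.Chars.lstrip cur.reverse with
        | nil =>
          have h1 : pvLoopA (cur.reverse :: pvSplitAux f rest [])
              = pvLoopA (pvSplitAux f rest []) := by
            simp [pvLoopA, pv_strip_of_lstrip_nil he]
          rw [h1, ih rest []]
          simp only [List.reverse_nil, List.nil_append]
          exact (pv_classify_skip he '\n' (by decide) rest).symm
        | cons h t =>
          have hs := pv_strip_of_lstrip_cons he
          have hsw : PySem.Chars.startswith (h :: PySem.Chars.rstrip t) ['='] = (h == '=') := by
            simp [PySem.Chars.startswith, List.isPrefixOf, BEq.comm]
          have hcl : pvClassify (cur.reverse ++ '\n' :: rest)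
              = if h = '=' then "mrk" else "line" := by
            unfold pvClassify
            rw [pv_lstrip_append, he]
            simp
          by_cases hq : h = '='
          · simp [pvLoopA, hs, PySem.Chars.startswith, List.isPrefixOf, hq, hcl]
          · simp [pvLoopA, hs, hsw, hq, hcl]
      · have hstep : pvSplitAux (f+1) (c :: rest) cur = pvSplitAux f rest (c :: cur) := by
          simp [pvSplitAux, hc]
        rw [hstep, ih rest (c :: cur)]
        simp

theorem pv_alt_eq (content : String) : detect_format_alt content = pvClassify content.toList := by
  unfold detect_format_alt
  cases he : PySem.Chars.lstrip content.toList with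
  | nil =>
    simp [pvClassify, he, pv_strip_of_lstrip_nil he]
  | cons h t =>
    have hs := pv_strip_of_lstrip_cons he
    by_cases hq : h = '='
    · simp [pvClassify, he, hs, hq, PySem.List.pyGet?, PySem.List.pyIdx?]
    · simp [pvClassify, he, hs, hq, PySem.List.pyGet?, PySem.List.pyIdx?]

-- ===== VERDICT (by name: the statement is the Claim_ definition above) =====
theorem detect_format_spec : Claim_equal_detect_format := by
  intro content _
  unfold Spec_detect_format detect_format
  unfold PySem.Chars.splitOn
  rw [pv_go_eq, pv_alt_eq]
  simpa using pv_main (content.toList.length + 1) content.toList []
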